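-- pv_equiv track=rewrite | github.com/rijulizer/TVA | utils.py | cal_result
-- ===== SOURCE A (Python) =====
-- def cal_result(env_candidates, votes: dict) -> (dict,list) : #-> tuple[dict,list]
--     inital_result = {}
--     # iterate all the agent votes
--     for vote in votes.values():
--         # iterates all the candidates
--         for c_index, c_val in enumerate(env_candidates):
--             # check if the candidate is a key in the inital_result
--             if c_val in inital_result.keys():
--                 # add the vote of the candidate
--                 inital_result[c_val] += vote[c_index]
--             else:
--                 inital_result[c_val] = vote[c_index]
--
--     # sorted_dict = dict(sorted(inital_result.items(), key=lambda item: item[1], reverse=True))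
--     # Sort based on the reverse of values and alphabatical order of keys
--     sorted_dict = dict(sorted(inital_result.items(), key=lambda item:(-item[1],item[0])))
--     sorted_list = list(sorted(sorted_dict, key=inital_result.get, reverse=True))
--     return (sorted_dict, sorted_list)
-- ===== SOURCE B (Python) =====
-- def cal_result(env_candidates, votes: dict):
--     result = {}
--     if votes:
--         # pass 1: per-index column totals across all votes
--         totals = [sum(vote[i] for vote in votes.values())
--                   for i in range(len(env_candidates))]
--         # pass 2: merge column totals into a name-keyed dict (duplicate names add up)
--         for name, total in zip(env_candidates, totals):
--             result[name] = result.get(name, 0) + total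
--     sorted_dict = dict(sorted(result.items(), key=lambda kv: (-kv[1], kv[0])))
--     return (sorted_dict, list(sorted_dict))
-- ===== Notes on version B (the rewrite author's own statement) =====
-- stated objective: alternative
-- what changed: B replaces A's interleaved per-vote/per-candidate accumulation with two separate passes: a column-sum pass over all votes per candidate index, then a single name-keyed merge pass, followed by one sort (B reads the sorted list straight off the sorted dict instead of A's second stable sort by value).
import Mathlib
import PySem

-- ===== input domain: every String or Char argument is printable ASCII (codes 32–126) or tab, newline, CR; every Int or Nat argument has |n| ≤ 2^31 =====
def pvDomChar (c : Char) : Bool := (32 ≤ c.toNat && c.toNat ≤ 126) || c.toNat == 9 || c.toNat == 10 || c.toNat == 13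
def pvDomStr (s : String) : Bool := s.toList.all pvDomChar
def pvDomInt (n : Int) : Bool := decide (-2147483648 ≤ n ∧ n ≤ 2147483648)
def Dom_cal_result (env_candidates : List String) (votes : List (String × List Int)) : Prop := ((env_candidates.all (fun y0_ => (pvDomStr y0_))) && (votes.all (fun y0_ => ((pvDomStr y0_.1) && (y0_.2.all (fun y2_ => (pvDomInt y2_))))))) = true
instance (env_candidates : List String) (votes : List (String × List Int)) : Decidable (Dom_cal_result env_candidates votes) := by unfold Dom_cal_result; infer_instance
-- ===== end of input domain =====

-- B separates A's interleaved per-vote/per-candidate accumulation into a column-sum pass and a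
-- name-keyed merge pass, and reads the sorted name list straight off the sorted dict instead of
-- A's second stable sort by value (objective: alternative decomposition, same cost).


-- ===== PORT A =====
def cal_result (env_candidates : List String) (votes : List (String × List Int)) : (List (String × Int)) × List String :=
  let vals := (PySem.Dict.ofList votes).values          -- votes.values()
  let inital_result : PySem.Dict String Int :=
    vals.foldl (fun d vote =>
      (PySem.List.enumerate env_candidates).foldl (fun d ic =>
        if d.contains ic.2 then
          d.modify ic.2 0 (· + PySem.List.pyGetD vote ic.1 0)   -- vote[c_index]; index in range under Pre_
        else
          d.insert ic.2 (PySem.List.pyGetD vote ic.1 0)) d) PySem.Dict.empty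
  let sorted_dict : PySem.Dict String Int :=
    PySem.Dict.ofList (PySem.List.sorted2 inital_result.items (fun it => -it.2) (fun it => it.1))
  -- key=inital_result.get: every key of sorted_dict is a key of inital_result, so .get is its value
  let sorted_list := PySem.List.sorted sorted_dict.keys (fun k => inital_result.getD k 0) true
  (sorted_dict.items, sorted_list)

-- ===== PORT B =====
def cal_result_alt (env_candidates : List String) (votes : List (String × List Int)) : (List (String × Int)) × List String :=
  let vals := (PySem.Dict.ofList votes).values          -- votes.values()
  let result : PySem.Dict String Int :=
    if vals.isEmpty then PySem.Dict.empty               -- `if votes:` — empty dict yields empty result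
    else
      let totals := (PySem.List.pyRange 0 (PySem.List.len env_candidates)).map
        (fun i => (vals.map (fun vote => PySem.List.pyGetD vote i 0)).sum)   -- vote[i]; in range under Pre_
      (env_candidates.zip totals).foldl
        (fun d nt => d.insert nt.1 (d.getD nt.1 0 + nt.2)) PySem.Dict.empty
  let sorted_dict : PySem.Dict String Int :=
    PySem.Dict.ofList (PySem.List.sorted2 result.items (fun kv => -kv.2) (fun kv => kv.1))
  (sorted_dict.items, sorted_dict.keys)

-- ===== PRECONDITION & SPEC =====
-- Pre_ excludes exactly the inputs where Python A raises IndexError: some vote list shorter than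
-- env_candidates (over duplicate dict keys this is slightly conservative: it asks every pair,
-- though only the last duplicate survives in the Python dict).
def Pre_cal_result (env_candidates : List String) (votes : List (String × List Int)) : Prop :=
  ∀ p ∈ votes, env_candidates.length ≤ p.2.length
instance (env_candidates : List String) (votes : List (String × List Int)) : Decidable (Pre_cal_result env_candidates votes) := by unfold Pre_cal_result; infer_instance
def pvWitness_cal_result : List String × (List (String × List Int)) := (["a", "b"], [("v1", [1, 2]), ("v2", [0, 3])])
def Spec_cal_result (env_candidates : List String) (votes : List (String × List Int)) (out : (List (String × Int)) × List String) : Prop := out = cal_result_alt env_candidates votes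
instance (env_candidates : List String) (votes : List (String × List Int)) (out : (List (String × Int)) × List String) : Decidable (Spec_cal_result env_candidates votes out) := by unfold Spec_cal_result; infer_instance

-- ===== CLAIM (what is proved, stated in full; the proofs are below) =====
def Claim_equal_cal_result : Prop := ∀ (env_candidates : List String) (votes : List (String × List Int)), Dom_cal_result env_candidates votes → Pre_cal_result env_candidates votes → Spec_cal_result env_candidates votes (cal_result env_candidates votes)

-- ===== LEMMAS AND PROOFS =====

-- value of the merge fold at one key: running total plus the sum of matching pairs
lemma pv_mfold_getD (ps : List (String × Int)) (d : PySem.Dict String Int) (k : String) :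
    (ps.foldl (fun d p => d.insert p.1 (d.getD p.1 0 + p.2)) d).getD k 0
      = d.getD k 0 + ((ps.filter (fun p => p.1 == k)).map Prod.snd).sum := by
  induction ps generalizing d with
  | nil => simp
  | cons p t ih =>
    simp only [List.foldl_cons, ih, List.filter_cons]
    by_cases h : p.1 = k
    · simp only [h, beq_self_eq_true, if_pos, List.map_cons, List.sum_cons,
        PySem.Dict.getD_insert]
      ring
    · have hb : (p.1 == k) = false := by simpa using h
      have hne : ¬ (k = p.1) := fun he => h he.symm
      simp [PySem.Dict.getD_insert, hb, hne]

lemma pv_mfold_keys (ps : List (String × Int)) :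
    (ps.foldl (fun d p => d.insert p.1 (d.getD p.1 0 + p.2)) PySem.Dict.empty).keys
      = PySem.Set.ofList (ps.map Prod.fst) := by
  rw [PySem.Dict.keys_foldl_insert_key ps Prod.fst (fun d p => d.getD p.1 0 + p.2) PySem.Dict.empty]
  simp [PySem.Dict.keys_empty, PySem.Set.update, PySem.Set.ofList_eq_foldl]

lemma pv_mfold_nodup (ps : List (String × Int)) :
    (ps.foldl (fun d p => d.insert p.1 (d.getD p.1 0 + p.2)) PySem.Dict.empty).keys.Nodup := by
  apply PySem.Dict.nodup_keys_foldl_insert_key ps Prod.fst (fun d p => d.getD p.1 0 + p.2)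
  simp [PySem.Dict.keys_empty]

-- adding only already-present elements leaves a Set unchanged
lemma pv_update_absorb (s : PySem.Set String) (xs : List String) (h : ∀ x ∈ xs, x ∈ s) :
    PySem.Set.update s xs = s := by
  induction xs generalizing s with
  | nil => rfl
  | cons x t ih =>
    have hmem : x ∈ s := h x (by simp)
    have hadd : PySem.Set.add s x = s := by simp [PySem.Set.add, hmem]
    have hstep : PySem.Set.update s (x :: t) = PySem.Set.update s t := by
      simp only [PySem.Set.update, List.foldl_cons, hadd]
    rw [hstep]
    exact ih s (fun y hy => h y (List.mem_cons_of_mem _ hy))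

lemma pv_ofList_append (a b : List String) :
    PySem.Set.ofList (a ++ b) = PySem.Set.update (PySem.Set.ofList a) b := by
  simp [PySem.Set.ofList_eq_foldl, PySem.Set.update, List.foldl_append]

lemma pv_keysset (env : List String) (vals : List (List Int)) (h : vals ≠ []) :
    PySem.Set.ofList ((vals.map (fun _ => env)).flatten) = PySem.Set.ofList env := by
  cases vals with
  | nil => exact absurd rfl h
  | cons v t =>
    simp only [List.map_cons, List.flatten_cons]
    rw [pv_ofList_append]
    apply pv_update_absorb
    intro x hx
    rw [PySem.Set.mem_ofList]
    rcases List.mem_flatten.mp hx with ⟨l, hl, hxl⟩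
    rcases List.mem_map.mp hl with ⟨_, _, rfl⟩
    exact hxl

-- exchanging the order of a double summation
lemma pv_sum_swap {α β : Type} (xs : List α) (ys : List β) (f : α → β → Int) :
    (xs.map (fun x => (ys.map (fun y => f x y)).sum)).sum
      = (ys.map (fun y => (xs.map (fun x => f x y)).sum)).sum := by
  induction xs with
  | nil => simp
  | cons x t ih =>
    simp only [List.map_cons, List.sum_cons, ih, ← PySem.List.sum_map_add_int]

-- A's nested accumulation is the merge fold over the flattened (name, ballot-entry) rows
lemma pv_A_norm (env : List String) (vals : List (List Int)) :
    vals.foldl (fun d vote =>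
      (PySem.List.enumerate env).foldl (fun d ic =>
        if d.contains ic.2 then
          d.modify ic.2 0 (· + PySem.List.pyGetD vote ic.1 0)
        else
          d.insert ic.2 (PySem.List.pyGetD vote ic.1 0)) d) PySem.Dict.empty
    = ((vals.map (fun v => (PySem.List.enumerate env).map
          (fun ic => (ic.2, PySem.List.pyGetD v ic.1 0)))).flatten).foldl
        (fun d p => d.insert p.1 (d.getD p.1 0 + p.2)) PySem.Dict.empty := by
  rw [List.foldl_flatten, List.foldl_map]
  apply PySem.List.foldl_congr_mem
  intro acc v _
  rw [List.foldl_map]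
  apply PySem.List.foldl_congr_mem
  intro d ic _
  by_cases h : d.contains ic.2
  · simp [PySem.Dict.modify, h]
  · rw [if_neg (by simp [h]), PySem.Dict.getD_of_not_contains d 0 (by simpa using h), zero_add]

-- B's zip of names with column totals, re-indexed through enumerate
lemma pv_B_norm (env : List String) (t : Int → Int) :
    env.zip ((PySem.List.pyRange 0 (PySem.List.len env)).map t)
      = (PySem.List.enumerate env).map (fun ic => (ic.2, t ic.1)) := by
  apply List.ext_getElem
  · simp [PySem.List.len, PySem.List.pyRange_zero_natCast, PySem.List.length_enumerate]
  · intro i h1 h2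
    simp [List.getElem_zip, PySem.List.len, PySem.List.pyRange_zero_natCast,
      PySem.List.getElem_enumerate]

-- the per-key totals of the two pair lists agree (Fubini for the vote table)
lemma pv_sums_eq (env : List String) (vals : List (List Int)) (k : String) :
    ((((vals.map (fun v => (PySem.List.enumerate env).map
          (fun ic => (ic.2, PySem.List.pyGetD v ic.1 0)))).flatten).filter
        (fun p => p.1 == k)).map Prod.snd).sum
      = ((((PySem.List.enumerate env).map
            (fun ic => (ic.2, (vals.map (fun vote => PySem.List.pyGetD vote ic.1 0)).sum))).filter
          (fun p => p.1 == k)).map Prod.snd).sum := by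
  simp only [List.filter_flatten, List.filter_map, List.map_flatten, List.map_map,
    List.sum_flatten, Function.comp_def]
  exact pv_sum_swap vals ((PySem.List.enumerate env).filter (fun ic => ic.2 == k))
    (fun v ic => PySem.List.pyGetD v ic.1 0)

-- two dicts with equal (duplicate-free) key lists and equal lookups are equal
lemma pv_dict_eq (d e : PySem.Dict String Int) (hd : d.keys.Nodup) (he : e.keys.Nodup)
    (hk : d.keys = e.keys) (hv : ∀ k, d.getD k 0 = e.getD k 0) : d = e := by
  apply PySem.Dict.ext
  rw [PySem.Dict.items_eq_map_keys d hd 0, PySem.Dict.items_eq_map_keys e he 0, hk]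
  exact List.map_congr_left (fun k _ => by rw [hv k])

-- the central fact: A's accumulated dict equals B's column-sum dict
lemma pv_dicts_eq (env : List String) (vals : List (List Int)) :
    vals.foldl (fun d vote =>
      (PySem.List.enumerate env).foldl (fun d ic =>
        if d.contains ic.2 then
          d.modify ic.2 0 (· + PySem.List.pyGetD vote ic.1 0)
        else
          d.insert ic.2 (PySem.List.pyGetD vote ic.1 0)) d) PySem.Dict.empty
    = (if vals.isEmpty then PySem.Dict.empty
       else (env.zip ((PySem.List.pyRange 0 (PySem.List.len env)).map
              (fun i => (vals.map (fun vote => PySem.List.pyGetD vote i 0)).sum))).foldl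
            (fun d nt => d.insert nt.1 (d.getD nt.1 0 + nt.2)) PySem.Dict.empty) := by
  by_cases hv : vals = []
  · subst hv; rfl
  · rw [if_neg (by simpa [List.isEmpty_iff] using hv), pv_A_norm,
      pv_B_norm env (fun i => (vals.map (fun vote => PySem.List.pyGetD vote i 0)).sum)]
    apply pv_dict_eq _ _ (pv_mfold_nodup _) (pv_mfold_nodup _)
    · rw [pv_mfold_keys, pv_mfold_keys]
      have h1 : ((vals.map (fun v => (PySem.List.enumerate env).map
            (fun ic => (ic.2, PySem.List.pyGetD v ic.1 0)))).flatten).map Prod.fst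
          = (vals.map (fun _ => env)).flatten := by
        rw [List.map_flatten, List.map_map]
        congr 1
        apply List.map_congr_left
        intro v _
        simp [List.map_map, Function.comp_def, PySem.List.map_snd_enumerate]
      have h2 : ((PySem.List.enumerate env).map
            (fun ic => (ic.2, (vals.map (fun vote => PySem.List.pyGetD vote ic.1 0)).sum))).map Prod.fst
          = env := by
        simp [List.map_map, Function.comp_def, PySem.List.map_snd_enumerate]
      rw [h1, h2, pv_keysset env vals hv]
    · intro k
      rw [pv_mfold_getD, pv_mfold_getD, pv_sums_eq]

-- a list already sorted by (-total, name) is, read through the dict's lookups, sorted by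
-- descending total — lexicographic pairwise invariant of sorted2's insertion fold
lemma pv_insertBy_lex {α : Type} (k1 : α → Int) (k2 : α → String) (x : α) (ys : List α)
    (h : ys.Pairwise (fun a b => k1 a < k1 b ∨ (k1 a = k1 b ∧ k2 a ≤ k2 b))) :
    (PySem.List.insertBy
        (fun a b => decide (k1 a < k1 b) || (!decide (k1 b < k1 a) && decide (k2 a < k2 b)))
        x ys).Pairwise (fun a b => k1 a < k1 b ∨ (k1 a = k1 b ∧ k2 a ≤ k2 b)) := by
  induction ys with
  | nil => simp [PySem.List.insertBy]
  | cons y t ih =>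
    rw [List.pairwise_cons] at h
    obtain ⟨hy, ht⟩ := h
    have hstep : PySem.List.insertBy
        (fun a b => decide (k1 a < k1 b) || (!decide (k1 b < k1 a) && decide (k2 a < k2 b))) x (y :: t)
      = if (decide (k1 x < k1 y) || (!decide (k1 y < k1 x) && decide (k2 x < k2 y))) = true
        then x :: y :: t
        else y :: PySem.List.insertBy
          (fun a b => decide (k1 a < k1 b) || (!decide (k1 b < k1 a) && decide (k2 a < k2 b))) x t := rfl
    by_cases hb : (decide (k1 x < k1 y) || (!decide (k1 y < k1 x) && decide (k2 x < k2 y))) = true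
    · rw [hstep, if_pos hb]
      have hxy : k1 x < k1 y ∨ (k1 x = k1 y ∧ k2 x ≤ k2 y) := by
        simp only [Bool.or_eq_true, Bool.and_eq_true, Bool.not_eq_true', decide_eq_true_eq,
          decide_eq_false_iff_not] at hb
        rcases hb with h1 | ⟨h2, h3⟩
        · exact Or.inl h1
        · rcases lt_or_eq_of_le (not_lt.mp h2) with h4 | h4
          · exact Or.inl h4
          · exact Or.inr ⟨h4, le_of_lt h3⟩
      constructor
      · intro z hz
        rcases hz with _ | hz
        · exact hxy
        · have hyz := hy z (by assumption)
          rcases hxy with h1 | ⟨h1, h1'⟩ <;> rcases hyz with h2 | ⟨h2, h2'⟩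
          · exact Or.inl (lt_trans h1 h2)
          · exact Or.inl (h2 ▸ h1)
          · exact Or.inl (h1 ▸ h2)
          · exact Or.inr ⟨h1.trans h2, h1'.trans h2'⟩
      · exact List.pairwise_cons.mpr ⟨hy, ht⟩
    · rw [hstep, if_neg hb]
      have hyx : k1 y < k1 x ∨ (k1 y = k1 x ∧ k2 y ≤ k2 x) := by
        simp only [Bool.or_eq_true, Bool.and_eq_true, Bool.not_eq_true', decide_eq_true_eq,
          decide_eq_false_iff_not, not_or, not_and] at hb
        obtain ⟨h1, h2⟩ := hb
        rcases lt_or_eq_of_le (not_lt.mp h1) with h3 | h3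
        · exact Or.inl h3
        · have h4 : ¬ k1 y < k1 x := by rw [h3]; exact lt_irrefl _
          exact Or.inr ⟨h3, not_lt.mp (h2 h4)⟩
      constructor
      · intro z hz
        rcases (PySem.List.mem_insertBy _ x z t).mp hz with rfl | hz
        · exact hyx
        · exact hy z hz
      · exact ih ht

lemma pv_sorted2_lex {α : Type} (xs : List α) (k1 : α → Int) (k2 : α → String) :
    (PySem.List.sorted2 xs k1 k2 false).Pairwise
      (fun a b => k1 a < k1 b ∨ (k1 a = k1 b ∧ k2 a ≤ k2 b)) := by
  show (List.foldl (fun acc x => PySem.List.insertBy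
      (fun a b => decide (k1 a < k1 b) || (!decide (k1 b < k1 a) && decide (k2 a < k2 b))) x acc)
      [] xs).Pairwise _
  suffices h : ∀ acc : List α,
      acc.Pairwise (fun a b => k1 a < k1 b ∨ (k1 a = k1 b ∧ k2 a ≤ k2 b)) →
      (List.foldl (fun acc x => PySem.List.insertBy
        (fun a b => decide (k1 a < k1 b) || (!decide (k1 b < k1 a) && decide (k2 a < k2 b))) x acc)
        acc xs).Pairwise (fun a b => k1 a < k1 b ∨ (k1 a = k1 b ∧ k2 a ≤ k2 b)) by
    exact h [] (by simp)
  induction xs with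
  | nil => exact fun acc h => h
  | cons x t ih =>
    intro acc hacc
    exact ih _ (pv_insertBy_lex k1 k2 x acc hacc)

-- A's second, value-keyed stable sort leaves the (-value, name)-sorted key list unchanged
lemma pv_sorted_list_eq (I : PySem.Dict String Int) (h : I.keys.Nodup) :
    PySem.List.sorted
      (PySem.Dict.ofList (PySem.List.sorted2 I.items (fun it => -it.2) (fun it => it.1))).keys
      (fun k => I.getD k 0) true
    = (PySem.Dict.ofList (PySem.List.sorted2 I.items (fun it => -it.2) (fun it => it.1))).keys := by
  have hperm : (PySem.List.sorted2 I.items (fun it => -it.2) (fun it => it.1)).Perm I.items :=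
    PySem.List.sorted2_perm _ _ _ _
  have hkeysperm : ((PySem.List.sorted2 I.items (fun it => -it.2) (fun it => it.1)).map Prod.fst).Perm I.keys :=
    hperm.map Prod.fst
  have hnodupS : ((PySem.List.sorted2 I.items (fun it => -it.2) (fun it => it.1)).map Prod.fst).Nodup :=
    hkeysperm.nodup_iff.mpr h
  have hitems : (PySem.Dict.ofList (PySem.List.sorted2 I.items (fun it => -it.2) (fun it => it.1))).items
      = PySem.List.sorted2 I.items (fun it => -it.2) (fun it => it.1) := by
    show (PySem.Dict.empty.update _).items = _
    unfold PySem.Dict.update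
    rw [PySem.Dict.items_foldl_insert_fresh _ Prod.fst Prod.snd PySem.Dict.empty
      (fun a _ => PySem.Dict.contains_empty _) hnodupS]
    simp [PySem.Dict.empty]
  have hkeys : (PySem.Dict.ofList (PySem.List.sorted2 I.items (fun it => -it.2) (fun it => it.1))).keys
      = (PySem.List.sorted2 I.items (fun it => -it.2) (fun it => it.1)).map Prod.fst := by
    simp [PySem.Dict.keys, hitems]
  have hpair : (PySem.List.sorted2 I.items (fun it => -it.2) (fun it => it.1)).Pairwise
      (fun p q => I.getD q.1 0 ≤ I.getD p.1 0) := by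
    refine List.Pairwise.imp_of_mem ?_ (pv_sorted2_lex I.items (fun it => -it.2) (fun it => it.1))
    intro p q hp hq hr
    have hp' : I.getD p.1 0 = p.2 :=
      PySem.Dict.getD_of_mem_items I (k := p.1) (v := p.2)
        (by simpa using hperm.mem_iff.mp hp) h 0
    have hq' : I.getD q.1 0 = q.2 :=
      PySem.Dict.getD_of_mem_items I (k := q.1) (v := q.2)
        (by simpa using hperm.mem_iff.mp hq) h 0
    rw [hp', hq']
    rcases hr with h1 | ⟨h1, _⟩ <;> omega
  rw [hkeys]
  exact PySem.List.sorted_rev_eq_self_of_pairwise _ (fun k => I.getD k 0)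
    (List.pairwise_map.mpr hpair)

lemma pv_main (env_candidates : List String) (votes : List (String × List Int)) :
    cal_result env_candidates votes = cal_result_alt env_candidates votes := by
  simp only [cal_result, cal_result_alt]
  rw [pv_dicts_eq env_candidates ((PySem.Dict.ofList votes).values)]
  refine Prod.ext rfl ?_
  apply pv_sorted_list_eq
  by_cases hv : ((PySem.Dict.ofList votes).values).isEmpty
  · simp [hv, PySem.Dict.keys_empty]
  · rw [if_neg (by simpa using hv),
      pv_B_norm env_candidates
        (fun i => (((PySem.Dict.ofList votes).values).map (fun vote => PySem.List.pyGetD vote i 0)).sum)]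
    exact pv_mfold_nodup _

-- ===== VERDICT (by name: the statement is the Claim_ definition above) =====
theorem cal_result_spec : Claim_equal_cal_result := by
  intro env_candidates votes _ _
  exact pv_main env_candidates votes
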